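-- pv_equiv track=rewrite | github.com/Mondego/pyreco | repoData/nvie-vim-rst-tables/allPythonContent.py | join_rows
-- ===== SOURCE A (Python) =====
-- def join_rows(rows, sep='\n'):
--     """Given a list of rows (a list of lists) this function returns a
--     flattened list where each the individual columns of all rows are joined
--     together using the line separator.
--
--     """
--     output = []
--     for row in rows:
--         # grow output array, if necessary
--         if len(output) <= len(row):
--             for i in range(len(row) - len(output)):
--                 output.extend([[]])
--
--         for i, field in enumerate(row):
--             field_text = field.strip()
--             if field_text:
--                 output[i].append(field_text)
--     return map(lambda lines: sep.join(lines), output)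
-- ===== SOURCE B (Python) =====
-- def join_rows(rows, sep='\n'):
--     """Column-wise re-implementation: compute the column count, then build
--     each joined column directly from the rows."""
--     ncols = max((len(row) for row in rows), default=0)
--
--     def column(i):
--         return [ft for ft in (row[i].strip() for row in rows if i < len(row)) if ft]
--
--     return map(sep.join, map(column, range(ncols)))
-- ===== Notes on version B (the rewrite author's own statement) =====
-- stated objective: simpler
-- what changed: B replaces A's row-wise accumulator (growing a mutable list of columns and appending into it per field) with a direct column-wise construction: compute the column count, then build each joined column by one pass over the rows.
import Mathlib
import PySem

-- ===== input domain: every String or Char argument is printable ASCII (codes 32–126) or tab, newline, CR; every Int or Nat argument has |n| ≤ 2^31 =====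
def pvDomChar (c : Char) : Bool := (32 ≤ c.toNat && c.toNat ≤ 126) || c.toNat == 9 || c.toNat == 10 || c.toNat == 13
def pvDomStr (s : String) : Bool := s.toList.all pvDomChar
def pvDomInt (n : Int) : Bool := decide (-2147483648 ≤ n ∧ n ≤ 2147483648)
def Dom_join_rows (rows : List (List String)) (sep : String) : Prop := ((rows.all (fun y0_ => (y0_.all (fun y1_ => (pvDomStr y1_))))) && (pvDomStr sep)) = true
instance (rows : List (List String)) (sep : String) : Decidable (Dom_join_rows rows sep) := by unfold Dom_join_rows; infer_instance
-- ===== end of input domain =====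

-- B is a column-wise re-implementation (simpler decomposition, same cost); the equivalence below is about the return value (both Pythons return a map object, compared as a list).

-- ===== PORT A =====
-- grow phase: 'if len(output) <= len(row): for i in range(len(row)-len(output)): output.extend([[]])'
def growA (output : List (List String)) (row : List String) : List (List String) :=
  if output.length ≤ row.length then
    (List.range (row.length - output.length)).foldl (fun o _ => o ++ [[]]) output
  else output

-- fill phase: 'for i, field in enumerate(row): …; output[i].append(field_text)'.
-- output[i] is always in range here (output was grown first), so List.modify is exact;
-- the enumerate index is nonnegative, so .toNat is exact.
def fillA (output : List (List String)) (row : List String) : List (List String) :=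
  (PySem.List.enumerate row (0 : Int)).foldl (fun o p =>
    let ft := PySem.Str.strip p.2
    if ft ≠ "" then o.modify p.1.toNat (fun lines => lines ++ [ft]) else o) output

def join_rows (rows : List (List String)) (sep : String) : List String :=
  (rows.foldl (fun output row => fillA (growA output row) row) []).map
    (fun lines => PySem.Str.join sep lines)

-- ===== PORT B =====
-- the per-row contribution to column i: row[i].strip() if present and truthy, else nothing
def contribB (i : Nat) (row : List String) : Option String :=
  row[i]?.bind (fun f => let ft := PySem.Str.strip f; if ft = "" then none else some ft)

def join_rows_alt (rows : List (List String)) (sep : String) : List String :=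
  let ncols := rows.foldl (fun m row => max m row.length) 0
  (List.range ncols).map (fun i =>
    PySem.Str.join sep (rows.filterMap (fun row => contribB i row)))

-- ===== PRECONDITION & SPEC =====
def Spec_join_rows (rows : List (List String)) (sep : String) (out : List String) : Prop := out = join_rows_alt rows sep
instance (rows : List (List String)) (sep : String) (out : List String) : Decidable (Spec_join_rows rows sep out) := by unfold Spec_join_rows; infer_instance

-- ===== CLAIM (what is proved, stated in full; the proofs are below) =====
def Claim_equal_join_rows : Prop := ∀ (rows : List (List String)) (sep : String), Dom_join_rows rows sep → Spec_join_rows rows sep (join_rows rows sep)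

-- ===== LEMMAS AND PROOFS =====

theorem range_foldl_pad (o : List (List String)) (n : Nat) :
    (List.range n).foldl (fun o _ => o ++ [[]]) o = o ++ List.replicate n [] := by
  induction n with
  | zero => simp
  | succ n ih => rw [List.range_succ, List.foldl_append, ih, List.replicate_succ']; simp

theorem growA_eq (g : List (List String)) (r : List String) :
    growA g r = g ++ List.replicate (r.length - g.length) [] := by
  unfold growA
  split_ifs with h
  · exact range_foldl_pad _ _
  · have : r.length - g.length = 0 := by omega
    simp [this]

theorem growA_length (g : List (List String)) (r : List String) :
    (growA g r).length = max g.length r.length := by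
  rw [growA_eq]; simp; omega

theorem growA_getD (g : List (List String)) (r : List String) (j : Nat) :
    (growA g r).getD j [] = g.getD j [] := by
  rw [growA_eq]
  rcases lt_or_ge j g.length with h | h
  · simp [List.getD, List.getElem?_append_left h]
  · have h1 : g[j]? = none := by simp [List.getElem?_eq_none h]
    rcases lt_or_ge j (g.length + (r.length - g.length)) with h2 | h2
    · have : (g ++ List.replicate (r.length - g.length) ([] : List String))[j]? =
          some [] := by
        rw [List.getElem?_append_right h]
        simp [List.getElem?_replicate]; omega
      simp [List.getD, this, h1]
    · have : (g ++ List.replicate (r.length - g.length) ([] : List String))[j]? = none := by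
        rw [List.getElem?_eq_none]; simp; omega
      simp [List.getD, this, h1]

theorem fillA_aux_length (row : List String) (s : Nat) (g : List (List String)) :
    ((PySem.List.enumerate row (s : Int)).foldl (fun o p =>
        let ft := PySem.Str.strip p.2
        if ft ≠ "" then o.modify p.1.toNat (fun lines => lines ++ [ft]) else o) g).length
      = g.length := by
  induction row generalizing s g with
  | nil => simp [PySem.List.enumerate_nil]
  | cons f row ih =>
      rw [PySem.List.enumerate_cons]
      simp only [List.foldl_cons]
      have : ((s : Int) + 1) = ((s + 1 : Nat) : Int) := by push_cast; ring
      rw [this, ih]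
      split_ifs <;> simp [List.length_modify]

theorem fillA_aux_getD (row : List String) (s : Nat) (g : List (List String))
    (h : s + row.length ≤ g.length) (j : Nat) :
    ((PySem.List.enumerate row (s : Int)).foldl (fun o p =>
        let ft := PySem.Str.strip p.2
        if ft ≠ "" then o.modify p.1.toNat (fun lines => lines ++ [ft]) else o) g).getD j []
      = g.getD j [] ++ (if s ≤ j then (contribB (j - s) row).toList else []) := by
  induction row generalizing s g with
  | nil => simp [PySem.List.enumerate_nil, contribB]
  | cons f row ih =>
      rw [PySem.List.enumerate_cons]
      simp only [List.foldl_cons]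
      have hc : ((s : Int) + 1) = ((s + 1 : Nat) : Int) := by push_cast; ring
      set step : List (List String) :=
        (if PySem.Str.strip f ≠ "" then
            g.modify (s : Int).toNat (fun lines => lines ++ [PySem.Str.strip f]) else g) with hstep
      have hlen : step.length = g.length := by
        rw [hstep]; split_ifs <;> simp [List.length_modify]
      have h' : s + 1 + row.length ≤ step.length := by rw [hlen]; simp at h ⊢; omega
      have := ih (s + 1) step h' 
      rw [hc]
      simp only at this
      rw [this]
      have htn : (s : Int).toNat = s := Int.toNat_natCast s
      have hstepj : step.getD j [] = g.getD j [] ++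
          (if s = j then (contribB 0 [f]).toList else []) := by
        rw [hstep, htn]
        split_ifs with hf hsj hsj
        · -- strip f ≠ "", so contribB 0 [f] = some (strip f)
          subst hsj
          have hjlt : s < g.length := by omega
          simp [List.getD, List.getElem?_eq_getElem hjlt, contribB, hf]
        · have : ¬ (s = j) := hsj
          simp [List.getD, this]
        · subst hsj
          have hf' : PySem.Str.strip f = "" := by simpa using hf
          simp [contribB, hf']
        · simp
      rw [hstepj]
      rcases Nat.lt_trichotomy j s with hlt | heq | hgt
      · have h1 : ¬ s = j := by omega
        have h2 : ¬ s + 1 ≤ j := by omega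
        have h3 : ¬ s ≤ j := by omega
        simp [h1, h2, h3]
      · subst heq
        have h2 : ¬ j + 1 ≤ j := by omega
        simp [h2, contribB]
      · have h1 : ¬ s = j := by omega
        have h2 : s + 1 ≤ j := by omega
        have h3 : s ≤ j := by omega
        have h4 : j - s = (j - (s + 1)) + 1 := by omega
        simp only [h1, if_false, h2, if_true, h3, List.append_nil]
        congr 2
        rw [h4]
        simp [contribB]

def stepRow (acc : List (List String)) (row : List String) : List (List String) :=
  fillA (growA acc row) row

theorem stepRow_length (acc : List (List String)) (row : List String) :
    (stepRow acc row).length = max acc.length row.length := by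
  unfold stepRow fillA
  have e : (0 : Int) = ((0 : Nat) : Int) := rfl
  rw [e, fillA_aux_length row 0 (growA acc row), growA_length]

theorem stepRow_getD (acc : List (List String)) (row : List String) (j : Nat) :
    (stepRow acc row).getD j [] = acc.getD j [] ++ (contribB j row).toList := by
  unfold stepRow fillA
  have hle : 0 + row.length ≤ (growA acc row).length := by rw [growA_length]; omega
  have e : (0 : Int) = ((0 : Nat) : Int) := rfl
  rw [e, fillA_aux_getD row 0 (growA acc row) hle j, growA_getD]
  simp

theorem outer_foldl (rows : List (List String)) (acc : List (List String)) :
    (rows.foldl stepRow acc).length = rows.foldl (fun m row => max m row.length) acc.length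
    ∧ ∀ j : Nat, (rows.foldl stepRow acc).getD j []
        = acc.getD j [] ++ rows.filterMap (fun row => contribB j row) := by
  induction rows generalizing acc with
  | nil => simp
  | cons r rows ih =>
      simp only [List.foldl_cons]
      obtain ⟨ihl, ihg⟩ := ih (stepRow acc r)
      constructor
      · rw [ihl, stepRow_length]
      · intro j
        rw [ihg j, stepRow_getD, List.append_assoc]
        congr 1
        rw [List.filterMap_cons]
        cases h : contribB j r <;> simp

theorem join_rows_spec : Claim_equal_join_rows := by
  unfold Claim_equal_join_rows
  intro rows sep _
  unfold Spec_join_rows join_rows join_rows_alt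
  have hA : rows.foldl (fun output row => fillA (growA output row) row) []
      = rows.foldl stepRow [] := by rfl
  rw [hA]
  obtain ⟨hlen, hget⟩ := outer_foldl rows []
  set n := rows.foldl (fun m row => max m row.length) 0 with hn
  have hlen' : (rows.foldl stepRow []).length = n := by simpa using hlen
  have hcols : rows.foldl stepRow []
      = (List.range n).map (fun i => rows.filterMap (fun row => contribB i row)) := by
    apply List.ext_getElem
    · simp [hlen']
    · intro i h1 h2
      have hin : i < n := by simpa [hlen'] using h1
      have := hget i
      have hgi : (rows.foldl stepRow [])[i] = (rows.foldl stepRow []).getD i [] := by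
        rw [List.getD, List.getElem?_eq_getElem h1]; rfl
      rw [hgi, this]
      simp
  rw [hcols, List.map_map]
  rfl

-- ===== VERDICT (by name: the statement is the Claim_ definition above) =====
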